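-- pv_equiv track=rewrite | github.com/lvory-coder/decoder | decoder.py | _gronsfeld_decrypt
-- ===== SOURCE A (Python) =====
-- def _gronsfeld_decrypt(text: str, key: str) -> str:
--     result = []
--     key_digits = []
--
--     for char in key:
--         if char.isdigit():
--             key_digits.append(int(char))
--         else:
--             if char.isalpha():
--                 key_digits.append((ord(char.upper()) - ord('A')) % 10)
--
--     if not key_digits:
--         return ""
--
--     key_len = len(key_digits)
--     key_index = 0
--
--     for char in text:
--         if char.isupper():
--             shift = key_digits[key_index % key_len]
--             decrypted = chr((ord(char) - ord('A') - shift) % 26 + ord('A'))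
--             result.append(decrypted)
--             key_index += 1
--         elif char.islower():
--             shift = key_digits[key_index % key_len]
--             decrypted = chr((ord(char) - ord('a') - shift) % 26 + ord('a'))
--             result.append(decrypted)
--             key_index += 1
--         else:
--             result.append(char)
--
--     return ''.join(result)
-- ===== SOURCE B (Python) =====
-- def _gronsfeld_decrypt(text: str, key: str) -> str:
--     key_digits = [int(c) if c.isdigit() else (ord(c.upper()) - ord('A')) % 10
--                   for c in key if c.isdigit() or c.isalpha()]
--     if not key_digits:
--         return ""
--     k = len(key_digits)
--     positions = [i for i, c in enumerate(text) if c.isalpha()]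
--     result = list(text)
--     # key-major traversal: one pass per key digit, patching every k-th letter;
--     # correct because the writes touch pairwise distinct positions.
--     for r, shift in enumerate(key_digits):
--         for j in range(r, len(positions), k):
--             i = positions[j]
--             c = text[i]
--             base = ord('A') if c.isupper() else ord('a')
--             result[i] = chr((ord(c) - base - shift) % 26 + base)
--     return ''.join(result)
-- ===== Notes on version B (the rewrite author's own statement) =====
-- stated objective: alternative
-- what changed: A makes one text-major pass carrying a self-incrementing key counter; B traverses key-major: it precomputes the letter positions, then for each key digit r makes a separate pass patching every k-th letter (ranks r, r+k, ...) in a copied text, exploiting that the writes hit disjoint positions so the traversal order can be inverted.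
import Mathlib
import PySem

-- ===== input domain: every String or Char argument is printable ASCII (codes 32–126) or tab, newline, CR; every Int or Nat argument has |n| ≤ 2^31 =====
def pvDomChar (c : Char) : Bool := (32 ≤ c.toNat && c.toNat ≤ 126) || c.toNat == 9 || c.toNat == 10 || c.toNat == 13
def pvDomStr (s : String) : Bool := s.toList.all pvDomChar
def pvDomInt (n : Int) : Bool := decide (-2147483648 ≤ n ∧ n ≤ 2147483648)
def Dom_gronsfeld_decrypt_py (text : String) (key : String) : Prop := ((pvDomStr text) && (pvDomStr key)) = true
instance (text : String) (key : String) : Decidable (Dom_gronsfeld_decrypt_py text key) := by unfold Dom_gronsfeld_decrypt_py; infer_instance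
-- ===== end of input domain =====

-- B replaces A's single text-major pass with a self-incrementing key counter by a key-major
-- traversal: one patching pass per key digit over every k-th letter position (objective: alternative).
-- Char.isDigit/isAlpha/isUpper/isLower and Char.toUpper are exact for Python's
-- str.isdigit/isalpha/isupper/islower/upper on the ASCII domain Dom_.

-- ===== PORT A =====
def gronsfeld_decrypt_py (text : String) (key : String) : String :=
  let key_digits : List Int := key.toList.foldl (fun kd c =>
    if c.isDigit then kd ++ [((c.toNat : Int) - 48)]      -- int(char), exact on ASCII digits
    else if c.isAlpha then kd ++ [PySem.Int.mod ((c.toUpper.toNat : Int) - 65) 10]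
    else kd) []
  if key_digits = [] then ""
  else
    let key_len := key_digits.length
    -- key_index is a nonnegative Python int; Nat with Nat.mod is exact, and
    -- key_index % key_len < key_len so getD's default is never used (no IndexError).
    let st := text.toList.foldl (fun (st : List Char × Nat) c =>
      if c.isUpper then
        (st.1 ++ [Char.ofNat (PySem.Int.mod ((c.toNat : Int) - 65 - key_digits.getD (st.2 % key_len) 0) 26 + 65).toNat], st.2 + 1)
      else if c.isLower then
        (st.1 ++ [Char.ofNat (PySem.Int.mod ((c.toNat : Int) - 97 - key_digits.getD (st.2 % key_len) 0) 26 + 97).toNat], st.2 + 1)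
      else (st.1 ++ [c], st.2)) ([], 0)
    String.ofList st.1

-- ===== PORT B =====
def gronsfeld_decrypt_py_alt (text : String) (key : String) : String :=
  let key_digits : List Int := (key.toList.filter (fun c => c.isDigit || c.isAlpha)).map
    (fun c => if c.isDigit then ((c.toNat : Int) - 48)
              else PySem.Int.mod ((c.toUpper.toNat : Int) - 65) 10)
  if key_digits = [] then ""
  else
    let k : Int := (key_digits.length : Int)
    let positions : List Int :=
      ((PySem.List.enumerate text.toList).filter (fun ic => ic.2.isAlpha)).map (fun ic => ic.1)
    -- i = positions[j] and c = text[i] are always in range (enumerate yields valid indices and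
    -- range(r, len(positions), k) stays below len(positions)), so pyGetD's default is never used;
    -- i ≥ 0, so result[i] = … is List.set at i.toNat on an in-range index (no IndexError).
    let result := (PySem.List.enumerate key_digits).foldl (fun res rs =>
      (PySem.List.pyRange rs.1 (positions.length : Int) k).foldl (fun (res : List Char) j =>
        let i := PySem.List.pyGetD positions j 0
        let c := PySem.List.pyGetD text.toList i ' '
        let base : Int := if c.isUpper then 65 else 97
        res.set i.toNat (Char.ofNat (PySem.Int.mod ((c.toNat : Int) - base - rs.2) 26 + base).toNat)) res)
      text.toList
    String.ofList result

-- ===== PRECONDITION & SPEC =====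
def Spec_gronsfeld_decrypt_py (text : String) (key : String) (out : String) : Prop := out = gronsfeld_decrypt_py_alt text key
instance (text : String) (key : String) (out : String) : Decidable (Spec_gronsfeld_decrypt_py text key out) := by unfold Spec_gronsfeld_decrypt_py; infer_instance

-- ===== CLAIM (what is proved, stated in full; the proofs are below) =====
def Claim_equal_gronsfeld_decrypt_py : Prop := ∀ (text : String) (key : String), Dom_gronsfeld_decrypt_py text key → Spec_gronsfeld_decrypt_py text key (gronsfeld_decrypt_py text key)

-- ===== LEMMAS AND PROOFS =====

def gdVal (s : Int) (c : Char) : Char :=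
  let base : Int := if c.isUpper then 65 else 97
  Char.ofNat (PySem.Int.mod ((c.toNat : Int) - base - s) 26 + base).toNat

def gdSpec (kd : List Int) : Nat → List Char → List Char
  | _, [] => []
  | k, c :: cs =>
    if c.isUpper then
      Char.ofNat (PySem.Int.mod ((c.toNat : Int) - 65 - kd.getD (k % kd.length) 0) 26 + 65).toNat :: gdSpec kd (k + 1) cs
    else if c.isLower then
      Char.ofNat (PySem.Int.mod ((c.toNat : Int) - 97 - kd.getD (k % kd.length) 0) 26 + 97).toNat :: gdSpec kd (k + 1) cs
    else c :: gdSpec kd k cs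

def gdPatch (init : List Char) (ps : List (Nat × Char)) : List Char :=
  ps.foldl (fun r p => r.set p.1 p.2) init

def gdLA (kd : List Int) : Nat → Nat → List Char → List (Nat × Char)
  | _, _, [] => []
  | k0, i0, c :: cs =>
    if c.isAlpha then (i0, gdVal (kd.getD (k0 % kd.length) 0) c) :: gdLA kd (k0 + 1) (i0 + 1) cs
    else gdLA kd k0 (i0 + 1) cs

theorem gdPatch_cons (init : List Char) (p : Nat × Char) (ps : List (Nat × Char)) :
    gdPatch init (p :: ps) = gdPatch (init.set p.1 p.2) ps := rfl

theorem gdPatch_shift (x : Char) (xs : List Char) (ps : List (Nat × Char)) :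
    gdPatch (x :: xs) (ps.map (fun p => (p.1 + 1, p.2))) = x :: gdPatch xs ps := by
  induction ps generalizing xs with
  | nil => rfl
  | cons p ps ih =>
    rw [List.map_cons, gdPatch_cons, gdPatch_cons, List.set_cons_succ]
    exact ih _

theorem gdLA_shift (kd : List Int) (k0 i0 : Nat) (l : List Char) :
    gdLA kd k0 (i0 + 1) l = (gdLA kd k0 i0 l).map (fun p => (p.1 + 1, p.2)) := by
  induction l generalizing k0 i0 with
  | nil => simp [gdLA]
  | cons c cs ih =>
    by_cases ha : c.isAlpha <;> simp [gdLA, ha, ih]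

theorem gdSpec_eq_patch (kd : List Int) (k0 : Nat) (l : List Char) :
    gdSpec kd k0 l = gdPatch l (gdLA kd k0 0 l) := by
  induction l generalizing k0 with
  | nil => rfl
  | cons c cs ih =>
    have halpha : c.isAlpha = (c.isUpper || c.isLower) := rfl
    cases hu : c.isUpper <;> cases hl : c.isLower <;>
      simp only [gdSpec, gdLA, halpha, hu, hl, Bool.or_true, Bool.or_false,
        Bool.false_eq_true, if_true, if_false,
        gdLA_shift kd _ 0, gdPatch_cons, List.set_cons_zero, gdPatch_shift, gdVal, ih]

theorem gdPatch_perm (init : List Char) {ps qs : List (Nat × Char)} (h : ps.Perm qs)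
    (hnd : (ps.map Prod.fst).Nodup) : gdPatch init ps = gdPatch init qs := by
  induction h generalizing init with
  | nil => rfl
  | cons p _ ih =>
    rw [gdPatch_cons, gdPatch_cons]
    rw [List.map_cons] at hnd
    exact ih _ hnd.of_cons
  | swap p q rest =>
    rw [gdPatch_cons, gdPatch_cons, gdPatch_cons, gdPatch_cons]
    have hne : q.1 ≠ p.1 := by
      rw [List.map_cons, List.map_cons, List.nodup_cons] at hnd
      exact fun e => hnd.1 (by simp [e])
    rw [List.set_comm _ _ hne]
  | trans h1 h2 ih1 ih2 =>
    rw [ih1 init hnd]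
    exact ih2 init (((h1.map Prod.fst).nodup_iff).mp hnd)

theorem gdLA_eq_mapEnum (kd : List Int) (k0 i0 : Nat) (l : List Char) :
    gdLA kd k0 i0 l
    = (PySem.List.enumerate ((PySem.List.enumerate l (i0 : Int)).filter (fun ic => ic.2.isAlpha)) (k0 : Int)).map
        (fun jic => (jic.2.1.toNat,
          gdVal (PySem.List.pyGetD kd (PySem.Int.mod jic.1 (kd.length : Int)) 0) jic.2.2)) := by
  induction l generalizing k0 i0 with
  | nil => simp [gdLA, PySem.List.enumerate]
  | cons c cs ih =>
    by_cases ha : c.isAlpha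
    · have h1 : ((k0 : Int) + 1) = ((k0 + 1 : Nat) : Int) := by push_cast; ring
      have h2 : ((i0 : Int) + 1) = ((i0 + 1 : Nat) : Int) := by push_cast; ring
      simp only [gdLA, ha, if_true, PySem.List.enumerate]
      rw [List.filter_cons_of_pos (by simpa using ha)]
      simp only [PySem.List.enumerate, List.map_cons]
      rw [h1, h2, ← ih, PySem.Int.mod_natCast, PySem.List.pyGetD_natCast]
      simp
    · have h2 : ((i0 : Int) + 1) = ((i0 + 1 : Nat) : Int) := by push_cast; ring
      simp only [gdLA, ha, PySem.List.enumerate]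
      rw [List.filter_cons_of_neg (by simpa using ha), h2, ← ih]
      simp

theorem gd_mod_of_mem {k r j m : Int} (hk : 0 < k) (hr0 : 0 ≤ r) (hrk : r < k)
    (hj : j ∈ PySem.List.pyRange r m k) : PySem.Int.mod j k = r := by
  rw [PySem.List.mem_pyRange_iff_of_pos hk] at hj
  obtain ⟨hrj, _, c, hc⟩ := hj
  rw [PySem.Int.mod_eq_emod_of_pos hk]
  have hj' : j = r + c * k := by rw [mul_comm]; omega
  have hmm : (r + c * k) % k = r % k := by simp
  rw [hj', hmm]
  exact Int.emod_eq_of_lt hr0 hrk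

theorem gd_nodup_pyRange_step {s : Int} (a b : Int) (hs : 0 < s) :
    (PySem.List.pyRange a b s).Nodup := by
  rw [PySem.List.pyRange_of_pos a b hs]
  refine (List.nodup_range).map ?_
  intro x y hxy
  simp only at hxy
  have : (x : Int) = y := by nlinarith
  exact_mod_cast this

theorem gd_flat_perm {k m : Int} (hk : 0 < k) :
    ((PySem.List.pyRange 0 k).flatMap (fun r => PySem.List.pyRange r m k)).Perm
      (PySem.List.pyRange 0 m) := by
  rw [List.perm_ext_iff_of_nodup ?nd1 (PySem.List.nodup_pyRange_one 0 m)]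
  case nd1 =>
    rw [List.nodup_flatMap]
    constructor
    · intro r _; exact gd_nodup_pyRange_step r m hk
    · have hp := PySem.List.pairwise_lt_pyRange_one 0 k
      refine hp.imp_of_mem ?_
      intro r1 r2 h1 h2 hlt x hx1 hx2
      rw [PySem.List.mem_pyRange_one] at h1 h2
      have e1 := gd_mod_of_mem hk h1.1 h1.2 hx1
      have e2 := gd_mod_of_mem hk h2.1 h2.2 hx2
      omega
  · intro x
    simp only [List.mem_flatMap, PySem.List.mem_pyRange_one]
    constructor
    · rintro ⟨r, hr, hx⟩
      rw [PySem.List.mem_pyRange_iff_of_pos hk] at hx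
      exact ⟨by omega, hx.2.1⟩
    · rintro ⟨hx0, hxm⟩
      refine ⟨PySem.Int.mod x k, ⟨PySem.Int.mod_nonneg x hk, PySem.Int.mod_lt x hk⟩, ?_⟩
      rw [PySem.List.mem_pyRange_iff_of_pos hk]
      have hfm := PySem.Int.floordiv_mul_add_mod x k
      have hmn := PySem.Int.mod_nonneg x hk
      have hml := PySem.Int.mod_lt x hk
      have hq : 0 ≤ PySem.Int.floordiv x k := by nlinarith
      refine ⟨by nlinarith, hxm, ⟨PySem.Int.floordiv x k, by rw [mul_comm]; omega⟩⟩

theorem gd_pyGetD_mem {α : Type} (xs : List α) {i : Int} (d : α) (h0 : 0 ≤ i)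
    (h1 : i < (xs.length : Int)) : PySem.List.pyGetD xs i d ∈ xs := by
  rw [PySem.List.pyGetD_eq_getElem xs d h0 h1]
  exact List.getElem_mem _

theorem gd_lp_mem (l : List Char) (p : Int × Char → Bool) :
    ∀ e ∈ (PySem.List.enumerate l).filter p,
      0 ≤ e.1 ∧ PySem.List.pyGetD l e.1 ' ' = e.2 := by
  intro e he
  have he' : e ∈ PySem.List.enumerate l := List.mem_of_mem_filter he
  rw [PySem.List.enumerate_eq_map_pyRange l ' ', List.mem_map] at he'
  obtain ⟨j, hj, rfl⟩ := he'
  rw [PySem.List.mem_pyRange_one] at hj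
  exact ⟨hj.1, rfl⟩

theorem gd_keyDigits_eq (ks : List Char) (acc : List Int) :
    ks.foldl (fun kd c =>
      if c.isDigit then kd ++ [((c.toNat : Int) - 48)]
      else if c.isAlpha then kd ++ [PySem.Int.mod ((c.toUpper.toNat : Int) - 65) 10]
      else kd) acc
    = acc ++ (ks.filter (fun c => c.isDigit || c.isAlpha)).map
        (fun c => if c.isDigit then ((c.toNat : Int) - 48)
                  else PySem.Int.mod ((c.toUpper.toNat : Int) - 65) 10) := by
  induction ks generalizing acc with
  | nil => simp
  | cons c cs ih =>
    rw [List.foldl_cons]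
    by_cases hd : c.isDigit <;> by_cases ha : c.isAlpha <;>
      simp only [hd, ha, if_true] <;>
      rw [ih] <;> simp [hd, ha]

theorem gd_loopA_eq (kd : List Int) (l : List Char) (res : List Char) (k : Nat) :
    (l.foldl (fun (st : List Char × Nat) c =>
      if c.isUpper then
        (st.1 ++ [Char.ofNat (PySem.Int.mod ((c.toNat : Int) - 65 - kd.getD (st.2 % kd.length) 0) 26 + 65).toNat], st.2 + 1)
      else if c.isLower then
        (st.1 ++ [Char.ofNat (PySem.Int.mod ((c.toNat : Int) - 97 - kd.getD (st.2 % kd.length) 0) 26 + 97).toNat], st.2 + 1)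
      else (st.1 ++ [c], st.2)) (res, k)).1 = res ++ gdSpec kd k l := by
  induction l generalizing res k with
  | nil => simp [gdSpec]
  | cons c cs ih =>
    rw [List.foldl_cons]
    by_cases hu : c.isUpper <;> by_cases hl : c.isLower <;>
      simp only [hu, hl, if_true] <;>
      rw [ih] <;> simp [gdSpec, hu, hl]

set_option maxHeartbeats 1000000 in
theorem gd_loopB_eq (kd : List Int) (l : List Char) (h : kd ≠ []) :
    List.foldl
      (fun res rs =>
        List.foldl
          (fun (res : List Char) (j : Int) =>
            res.set (PySem.List.pyGetD (((PySem.List.enumerate l).filter (fun ic : Int × Char => ic.2.isAlpha)).map (fun ic : Int × Char => ic.1)) j 0).toNat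
              (Char.ofNat
                (PySem.Int.mod
                      ((((PySem.List.pyGetD l (PySem.List.pyGetD (((PySem.List.enumerate l).filter (fun ic : Int × Char => ic.2.isAlpha)).map (fun ic : Int × Char => ic.1)) j 0) ' ').toNat : Int) -
                          if (PySem.List.pyGetD l (PySem.List.pyGetD (((PySem.List.enumerate l).filter (fun ic : Int × Char => ic.2.isAlpha)).map (fun ic : Int × Char => ic.1)) j 0) ' ').isUpper = true then 65 else 97) -
                        rs.2)
                      26 +
                    if (PySem.List.pyGetD l (PySem.List.pyGetD (((PySem.List.enumerate l).filter (fun ic : Int × Char => ic.2.isAlpha)).map (fun ic : Int × Char => ic.1)) j 0) ' ').isUpper = true then 65 else 97).toNat))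
          res (PySem.List.pyRange rs.1 ((((PySem.List.enumerate l).filter (fun ic : Int × Char => ic.2.isAlpha)).map (fun ic : Int × Char => ic.1)).length : Int) (kd.length : Int)))
      l (PySem.List.enumerate kd)
    = gdSpec kd 0 l := by
  set lp := (PySem.List.enumerate l).filter (fun ic => ic.2.isAlpha) with hlp
  set pos := lp.map (fun ic => ic.1) with hpos
  symm
  have hklen : 0 < kd.length := List.length_pos_iff.mpr h
  have hkI : (0:Int) < (kd.length : Int) := by exact_mod_cast hklen
  rw [show PySem.List.enumerate kd = (PySem.List.pyRange 0 (kd.length : Int)).map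
        (fun r => (r, PySem.List.pyGetD kd r 0)) from by
      rw [PySem.List.enumerate_eq_map_pyRange kd 0, PySem.List.len_eq]]
  rw [List.foldl_map]
  rw [PySem.List.foldl_congr_mem _ _
    (fun res r => List.foldl (fun (res : List Char) j =>
      res.set (PySem.List.pyGetD pos j 0).toNat
        (gdVal (PySem.List.pyGetD kd (PySem.Int.mod j (kd.length : Int)) 0)
          (PySem.List.pyGetD l (PySem.List.pyGetD pos j 0) ' '))) res
      (PySem.List.pyRange r (pos.length : Int) (kd.length : Int))) l ?congrmem]
  case congrmem =>
    intro acc r hr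
    rw [PySem.List.mem_pyRange_one] at hr
    refine PySem.List.foldl_congr_mem _ _ _ _ ?_
    intro acc' j hj
    rw [gd_mod_of_mem hkI hr.1 hr.2 hj]
    simp only [gdVal]
  rw [← List.foldl_flatMap]
  rw [show ∀ (J : List Int), List.foldl (fun (res : List Char) j =>
      res.set (PySem.List.pyGetD pos j 0).toNat
        (gdVal (PySem.List.pyGetD kd (PySem.Int.mod j (kd.length : Int)) 0)
          (PySem.List.pyGetD l (PySem.List.pyGetD pos j 0) ' '))) l J
    = gdPatch l (J.map (fun j => ((PySem.List.pyGetD pos j 0).toNat,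
        gdVal (PySem.List.pyGetD kd (PySem.Int.mod j (kd.length : Int)) 0)
          (PySem.List.pyGetD l (PySem.List.pyGetD pos j 0) ' ')))) from by
      intro J; rw [gdPatch, List.foldl_map]]
  set G := (fun j => ((PySem.List.pyGetD pos j 0).toNat,
        gdVal (PySem.List.pyGetD kd (PySem.Int.mod j (kd.length : Int)) 0)
          (PySem.List.pyGetD l (PySem.List.pyGetD pos j 0) ' '))) with hGdef
  have hmapfst : ((PySem.List.pyRange 0 (pos.length : Int)).map G).map Prod.fst
      = pos.map Int.toNat := by
    rw [List.map_map]
    rw [show (Prod.fst ∘ G) = (Int.toNat ∘ fun j => PySem.List.pyGetD pos j 0) from rfl]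
    rw [← List.map_map, PySem.List.map_pyGetD_pyRange_zero' pos 0]
  have hppos : pos.Pairwise (· < ·) := by
    rw [hpos, List.pairwise_map]
    refine List.Pairwise.filter _ ?_
    rw [PySem.List.enumerate_eq_map_pyRange l ' ', List.pairwise_map]
    exact PySem.List.pairwise_lt_pyRange_one _ _
  have hposnn : ∀ x ∈ pos, 0 ≤ x := by
    intro x hx
    rw [hpos, List.mem_map] at hx
    obtain ⟨e, he, rfl⟩ := hx
    exact (gd_lp_mem l _ e (by rwa [hlp] at he)).1
  have hnd : (((PySem.List.pyRange 0 (pos.length : Int)).map G).map Prod.fst).Nodup := by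
    rw [hmapfst]
    have hpw : (pos.map Int.toNat).Pairwise (· < ·) := by
      rw [List.pairwise_map]
      refine hppos.imp_of_mem ?_
      intro a b ha hb hab
      have := hposnn a ha
      omega
    exact hpw.imp (fun hlt => Nat.ne_of_lt hlt)
  rw [(gdPatch_perm l ((gd_flat_perm hkI).map G).symm hnd).symm]
  rw [gdSpec_eq_patch, gdLA_eq_mapEnum]
  simp only [Nat.cast_zero]
  rw [← hlp]
  refine congrArg (gdPatch l) ?_
  rw [PySem.List.enumerate_eq_map_pyRange lp ((0:Int), ' '), PySem.List.len_eq, List.map_map]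
  rw [show (lp.length : Int) = (pos.length : Int) from by rw [hpos, List.length_map]]
  apply List.map_congr_left
  intro j hj
  rw [PySem.List.mem_pyRange_one] at hj
  have hjlt : j < (lp.length : Int) := by
    rw [hpos, List.length_map] at hj
    exact hj.2
  have hmem : PySem.List.pyGetD lp j ((0:Int), ' ') ∈ lp :=
    gd_pyGetD_mem lp ((0:Int), ' ') hj.1 hjlt
  have hprop := gd_lp_mem l (fun ic => ic.2.isAlpha) _ (hlp ▸ hmem)
  have hfst : PySem.List.pyGetD pos j 0 = (PySem.List.pyGetD lp j ((0:Int), ' ')).1 := by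
    rw [hpos]
    exact PySem.List.pyGetD_map (fun ic => ic.1) lp j ((0:Int), ' ')
  simp only [Function.comp_apply, hGdef]
  rw [hfst, hprop.2]


-- ===== VERDICT (by name: the statement is the Claim_ definition above) =====
set_option maxHeartbeats 1000000 in
theorem gronsfeld_decrypt_py_spec : Claim_equal_gronsfeld_decrypt_py := by
  intro text key _
  unfold Spec_gronsfeld_decrypt_py gronsfeld_decrypt_py gronsfeld_decrypt_py_alt
  rw [gd_keyDigits_eq]
  simp only [List.nil_append]
  set kd := (key.toList.filter (fun c => c.isDigit || c.isAlpha)).map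
    (fun c => if c.isDigit then ((c.toNat : Int) - 48)
              else PySem.Int.mod ((c.toUpper.toNat : Int) - 65) 10) with hkd
  by_cases h : kd = []
  · simp [h]
  · simp only [h, if_false]
    refine congrArg String.ofList ?_
    rw [gd_loopA_eq, gd_loopB_eq kd text.toList h]
    simp
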